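-- pv_equiv track=rewrite | github.com/jxrjxrjxr/G-Cause | algo/m_build_graph.py | getPeak
-- ===== SOURCE A (Python) =====
-- def getPeak(overCount, listSegment, x_i, y_i):
--     length = len(listSegment)
--     se, ov = listSegment, overCount
--     peakList = []
--     peakW = []
--     gap = se[1] - se[0]
--     segNum = 0
--     while segNum + 1 < length - 1:
--         if (segNum == 0 or ov[se[segNum]] > ov[se[segNum - 1]]) and ov[se[segNum]] >= ov[se[segNum + 1]]:
--             startNum = segNum
--             while segNum + 1 < length - 1 and ov[se[segNum]] == ov[se[segNum + 1]]:
--                 segNum += 1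
--             if segNum + 1 < length - 1 and ov[se[segNum]] < ov[se[segNum + 1]]:
--                 continue
--             peakList.append((se[segNum] + se[startNum] + gap) // 2)
--             peakW.append(segNum - startNum + 1)
--         segNum += 1
--     if segNum + 1 == length - 1 and ov[se[segNum]] > ov[se[segNum - 1]]:
--         peakList.append(se[segNum] + (gap // 2))
--         peakW.append(1)
--     # assert(-1)
--     # return sum(mul(peakList, peakW)) // (len(peakList) * sum(peakW)) if len(peakList) > 0 else -1
--     return sum(mul(peakList, peakW)) // (sum(peakW)) if len(peakList) > 0 else -1
--
-- def mul(list1, list2):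
--     return list(map(lambda item : item[0] * item[1], zip(list1, list2)))
-- ===== SOURCE B (Python) =====
-- def getPeak(overCount, listSegment, x_i, y_i):
--     se, ov = listSegment, overCount
--     gap = se[1] - se[0]
--     n = len(se) - 1
--     vals = [ov[se[i]] for i in range(n)]
--     # run-length-encode vals into maximal constant groups (value, start, end)
--     groups = []
--     i = 0
--     while i < n:
--         j = i
--         while j + 1 < n and vals[j + 1] == vals[i]:
--             j += 1
--         groups.append((vals[i], i, j))
--         i = j + 1
--     # a group is a peak iff it rises from the previous group (or is first)
--     # and falls to the next group (or is last)
--     peaks = []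
--     prev = None
--     while groups:
--         (v, s, e), groups = groups[0], groups[1:]
--         rising = prev is None or v > prev
--         falling = (not groups) or v > groups[0][0]
--         if rising and falling:
--             peaks.append(((se[e] + se[s] + gap) // 2, e - s + 1))
--         prev = v
--     if not peaks:
--         return -1
--     return sum(c * w for c, w in peaks) // sum(w for _, w in peaks)
-- ===== Notes on version B (the rewrite author's own statement) =====
-- stated objective: alternative
-- what changed: Replaces A's fused pointer walk (with continue-retries and a special tail clause) by run-length-encoding the segment counts into maximal constant groups and selecting peaks with a uniform rises-from-previous/falls-to-next group rule.
-- intended difference: On a 2-element listSegment (one lone segment) whose count is at most overCount[listSegment[1]], A's tail test reads listSegment[-1] by negative-index wraparound and returns -1, while B treats the lone group as both first and last and returns its weighted center, the intended peak of a single-segment window. — e.g. on getPeak([(0, 1), (1, 2)], [0, 1], 0, 0): A returns -1, B returns 0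
import Mathlib
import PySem

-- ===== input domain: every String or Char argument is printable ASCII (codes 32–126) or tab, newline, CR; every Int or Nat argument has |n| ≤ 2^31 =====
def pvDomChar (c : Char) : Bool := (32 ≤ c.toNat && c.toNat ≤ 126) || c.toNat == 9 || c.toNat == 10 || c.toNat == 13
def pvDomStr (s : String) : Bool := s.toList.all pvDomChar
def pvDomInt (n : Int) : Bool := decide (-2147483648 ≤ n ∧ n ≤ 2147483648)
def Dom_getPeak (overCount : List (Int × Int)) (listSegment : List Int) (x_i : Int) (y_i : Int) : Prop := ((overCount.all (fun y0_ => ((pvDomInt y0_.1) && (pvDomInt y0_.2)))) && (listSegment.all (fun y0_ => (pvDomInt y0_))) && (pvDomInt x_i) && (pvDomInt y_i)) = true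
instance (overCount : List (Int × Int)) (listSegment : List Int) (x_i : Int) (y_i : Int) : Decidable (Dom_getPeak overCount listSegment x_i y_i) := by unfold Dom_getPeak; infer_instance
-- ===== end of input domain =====

-- B replaces A's fused pointer walk (continue-retries + special tail clause) by run-length
-- encoding into constant groups plus a uniform rises-from-prev/falls-to-next peak rule
-- (objective: alternative; same O(n) cost; return value only, neither mutates its arguments).

-- shared primitive helpers: Python's se[i] (negative index from the end) and ov[se[i]]
def pvIdx (se : List Int) (i : Int) : Int := (PySem.List.pyGet? se i).getD 0
def pvOv (ov : List (Int × Int)) (se : List Int) (i : Int) : Int :=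
  (ov.lookup (pvIdx se i)).getD 0

-- ===== PORT A =====
def pvMul (list1 list2 : List Int) : List Int := (list1.zip list2).map (fun item => item.1 * item.2)

-- A's inner while: advance while the next value is equal (fuel = a bound on the
-- remaining iterations; every call passes enough for the loop to finish)
def pvPlat (ov : List (Int × Int)) (se : List Int) (L : Int) : Nat → Nat → Nat
  | 0, seg => seg
  | fuel + 1, seg =>
    if (seg : Int) + 1 < L - 1 ∧ pvOv ov se seg = pvOv ov se ((seg : Int) + 1) then
      pvPlat ov se L fuel (seg + 1)
    else seg

-- A's outer while (the 'continue' re-enters the loop at the plateau end)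
def pvLoop (ov : List (Int × Int)) (se : List Int) (L gap : Int) :
    Nat → Nat → List Int → List Int → Nat × List Int × List Int
  | 0, seg, pl, pw => (seg, pl, pw)
  | fuel + 1, seg, pl, pw =>
    if (seg : Int) + 1 < L - 1 then
      if (seg = 0 ∨ pvOv ov se seg > pvOv ov se ((seg : Int) - 1)) ∧
          pvOv ov se seg ≥ pvOv ov se ((seg : Int) + 1) then
        if (pvPlat ov se L fuel seg : Int) + 1 < L - 1 ∧
            pvOv ov se (pvPlat ov se L fuel seg) < pvOv ov se ((pvPlat ov se L fuel seg : Int) + 1) then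
          pvLoop ov se L gap fuel (pvPlat ov se L fuel seg) pl pw
        else
          pvLoop ov se L gap fuel (pvPlat ov se L fuel seg + 1)
            (pl ++ [PySem.Int.floordiv (pvIdx se (pvPlat ov se L fuel seg) + pvIdx se seg + gap) 2])
            (pw ++ [(pvPlat ov se L fuel seg : Int) - (seg : Int) + 1])
      else pvLoop ov se L gap fuel (seg + 1) pl pw
    else (seg, pl, pw)

-- A's final clause after the loop
def pvTail (ov : List (Int × Int)) (se : List Int) (L gap : Int)
    (r : Nat × List Int × List Int) : List Int × List Int :=
  if (r.1 : Int) + 1 = L - 1 ∧ pvOv ov se r.1 > pvOv ov se ((r.1 : Int) - 1) then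
    (r.2.1 ++ [pvIdx se r.1 + PySem.Int.floordiv gap 2], r.2.2 ++ [1])
  else (r.2.1, r.2.2)

def getPeak (overCount : List (Int × Int)) (listSegment : List Int) (x_i : Int) (y_i : Int) : Int :=
  let L : Int := listSegment.length
  let gap : Int := pvIdx listSegment 1 - pvIdx listSegment 0
  let r := pvTail overCount listSegment L gap
    (pvLoop overCount listSegment L gap (listSegment.length + 1) 0 [] [])
  if 0 < r.1.length then PySem.Int.floordiv (pvMul r.1 r.2).sum r.2.sum else -1

-- ===== PORT B =====
-- B's inner while: end of the maximal constant run starting at i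
def pvScanEnd (vals : List Int) (n : Nat) (i : Nat) : Nat → Nat → Nat
  | 0, j => j
  | fuel + 1, j =>
    if j + 1 < n ∧ vals.getD (j + 1) 0 = vals.getD i 0 then pvScanEnd vals n i fuel (j + 1)
    else j

-- B's run-length encoding loop: groups (value, start, end)
def pvRle (vals : List Int) (n : Nat) : Nat → Nat → List (Int × Nat × Nat)
  | 0, _ => []
  | fuel + 1, i =>
    if i < n then
      (vals.getD i 0, i, pvScanEnd vals n i fuel i)
        :: pvRle vals n fuel (pvScanEnd vals n i fuel i + 1)
    else []

-- B's group scan: a group is a peak iff it rises from the previous group and falls to the next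
def pvRising (prev : Option Int) (v : Int) : Bool :=
  match prev with | none => true | some p => decide (v > p)
def pvFalling (gs : List (Int × Nat × Nat)) (v : Int) : Bool :=
  match gs with | [] => true | (w, _, _) :: _ => decide (v > w)

def pvPeaks (se : List Int) (gap : Int) : Option Int → List (Int × Nat × Nat) → List (Int × Int)
  | _, [] => []
  | prev, (v, s, e) :: gs =>
    if pvRising prev v && pvFalling gs v then
      (PySem.Int.floordiv (pvIdx se e + pvIdx se s + gap) 2, (e : Int) - (s : Int) + 1)
        :: pvPeaks se gap (some v) gs
    else pvPeaks se gap (some v) gs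

def getPeak_alt (overCount : List (Int × Int)) (listSegment : List Int) (x_i : Int) (y_i : Int) : Int :=
  let gap : Int := pvIdx listSegment 1 - pvIdx listSegment 0
  let n : Int := (listSegment.length : Int) - 1
  let vals : List Int := (PySem.List.pyRange 0 n 1).map (fun i => pvOv overCount listSegment i)
  let peaks := pvPeaks listSegment gap none (pvRle vals vals.length (vals.length + 1) 0)
  if peaks.isEmpty then -1
  else PySem.Int.floordiv (peaks.map (fun p => p.1 * p.2)).sum (peaks.map (fun p => p.2)).sum

-- ===== PRECONDITION & SPEC =====
-- Pre_: exactly where the Python A returns: listSegment needs at least 2 elements (se[1] is read),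
-- overCount must have every listSegment[i], i < len-1, as a key (those counts are read), and for a
-- 2-element listSegment also the last element (A's tail test then reads ov[se[-1]]).
def Pre_getPeak (overCount : List (Int × Int)) (listSegment : List Int) (x_i : Int) (y_i : Int) : Prop :=
  2 ≤ listSegment.length ∧
    (∀ k ∈ listSegment.dropLast, (overCount.lookup k).isSome = true) ∧
    (listSegment.length = 2 → ∀ k ∈ listSegment, (overCount.lookup k).isSome = true)
instance (overCount : List (Int × Int)) (listSegment : List Int) (x_i : Int) (y_i : Int) : Decidable (Pre_getPeak overCount listSegment x_i y_i) := by unfold Pre_getPeak; infer_instance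

def pvWitness_getPeak : (List (Int × Int)) × List Int × Int × Int := ([(0, 5), (1, 3), (2, 1)], [0, 1, 2, 3], 0, 0)

-- On a 2-element listSegment (one lone segment) whose count is at most overCount[listSegment[1]],
-- A's tail test reads listSegment[-1] by negative-index wraparound and returns -1, while B treats
-- the lone group as both first (rising) and last (falling) and returns its weighted center, the
-- intended peak of a single-segment window.
def D_getPeak (overCount : List (Int × Int)) (listSegment : List Int) (x_i : Int) (y_i : Int) : Prop :=
  listSegment.length = 2 ∧
    (overCount.lookup (listSegment.getD 0 0)).getD 0 ≤ (overCount.lookup (listSegment.getD 1 0)).getD 0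
instance (overCount : List (Int × Int)) (listSegment : List Int) (x_i : Int) (y_i : Int) : Decidable (D_getPeak overCount listSegment x_i y_i) := by unfold D_getPeak; infer_instance

def Spec_getPeak (overCount : List (Int × Int)) (listSegment : List Int) (x_i : Int) (y_i : Int) (out : Int) : Prop := ¬ D_getPeak overCount listSegment x_i y_i → out = getPeak_alt overCount listSegment x_i y_i
instance (overCount : List (Int × Int)) (listSegment : List Int) (x_i : Int) (y_i : Int) (out : Int) : Decidable (Spec_getPeak overCount listSegment x_i y_i out) := by unfold Spec_getPeak; infer_instance

def pvDiffWitness_getPeak : (List (Int × Int)) × List Int × Int × Int := ([(0, 1), (1, 2)], [0, 1], 0, 0)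
def pvDiffWitnessOut_getPeak : Int × Int := (-1, 0)

-- ===== CLAIM (what is proved, stated in full; the proofs are below) =====
def Claim_unchanged_getPeak : Prop := ∀ (overCount : List (Int × Int)) (listSegment : List Int) (x_i : Int) (y_i : Int), Dom_getPeak overCount listSegment x_i y_i → Pre_getPeak overCount listSegment x_i y_i → Spec_getPeak overCount listSegment x_i y_i (getPeak overCount listSegment x_i y_i)
def Claim_changed_getPeak : Prop := Dom_getPeak (pvDiffWitness_getPeak.1) (pvDiffWitness_getPeak.2.1) (pvDiffWitness_getPeak.2.2.1) (pvDiffWitness_getPeak.2.2.2) ∧ Pre_getPeak (pvDiffWitness_getPeak.1) (pvDiffWitness_getPeak.2.1) (pvDiffWitness_getPeak.2.2.1) (pvDiffWitness_getPeak.2.2.2) ∧ D_getPeak (pvDiffWitness_getPeak.1) (pvDiffWitness_getPeak.2.1) (pvDiffWitness_getPeak.2.2.1) (pvDiffWitness_getPeak.2.2.2) ∧ getPeak (pvDiffWitness_getPeak.1) (pvDiffWitness_getPeak.2.1) (pvDiffWitness_getPeak.2.2.1) (pvDiffWitness_getPeak.2.2.2) = pvDiffWitnessOut_getPeak.1 ∧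 getPeak_alt (pvDiffWitness_getPeak.1) (pvDiffWitness_getPeak.2.1) (pvDiffWitness_getPeak.2.2.1) (pvDiffWitness_getPeak.2.2.2) = pvDiffWitnessOut_getPeak.2 ∧ pvDiffWitnessOut_getPeak.1 ≠ pvDiffWitnessOut_getPeak.2

-- ===== LEMMAS AND PROOFS =====

-- A's inner while: advance while the next value is equal
def pvPlatW (ov : List (Int × Int)) (se : List Int) (L : Int) (seg : Nat) : Nat :=
  if h : (seg : Int) + 1 < L - 1 ∧ pvOv ov se seg = pvOv ov se ((seg : Int) + 1) then
    pvPlatW ov se L (seg + 1)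
  else seg
termination_by (L - 1 - (seg : Int)).toNat
decreasing_by have := h.1; omega

lemma pvPlatW_ge (ov : List (Int × Int)) (se : List Int) (L : Int) (seg : Nat) :
    seg ≤ pvPlatW ov se L seg := by
  fun_induction pvPlatW <;> omega

def pvLoopW (ov : List (Int × Int)) (se : List Int) (L gap : Int) (seg : Nat)
    (pl pw : List Int) : Nat × List Int × List Int :=
  if h : (seg : Int) + 1 < L - 1 then
    if hc : (seg = 0 ∨ pvOv ov se seg > pvOv ov se ((seg : Int) - 1)) ∧
        pvOv ov se seg ≥ pvOv ov se ((seg : Int) + 1) then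
      if hk : (pvPlatW ov se L seg : Int) + 1 < L - 1 ∧
          pvOv ov se (pvPlatW ov se L seg) < pvOv ov se ((pvPlatW ov se L seg : Int) + 1) then
        pvLoopW ov se L gap (pvPlatW ov se L seg) pl pw
      else
        pvLoopW ov se L gap (pvPlatW ov se L seg + 1)
          (pl ++ [PySem.Int.floordiv (pvIdx se (pvPlatW ov se L seg) + pvIdx se seg + gap) 2])
          (pw ++ [(pvPlatW ov se L seg : Int) - (seg : Int) + 1])
    else pvLoopW ov se L gap (seg + 1) pl pw
  else (seg, pl, pw)
termination_by (L - 1 - (seg : Int)).toNat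
decreasing_by
  · have hge := pvPlatW_ge ov se L seg
    rcases Nat.lt_or_ge seg (pvPlatW ov se L seg) with hlt | hle
    · omega
    · have heq : pvPlatW ov se L seg = seg := Nat.le_antisymm hle hge
      rw [heq] at hk
      exact absurd hk.2 (not_lt.mpr hc.2)
  · have hge := pvPlatW_ge ov se L seg; omega
  · omega

-- B's inner while: end of the maximal constant run starting at i
def pvScanEndW (vals : List Int) (n : Nat) (i j : Nat) : Nat :=
  if j + 1 < n ∧ vals.getD (j + 1) 0 = vals.getD i 0 then pvScanEndW vals n i (j + 1) else j
termination_by n - j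

lemma pvScanEndW_ge (vals : List Int) (n i j : Nat) : j ≤ pvScanEndW vals n i j := by
  fun_induction pvScanEndW <;> omega

def pvRleW (vals : List Int) (n : Nat) (i : Nat) : List (Int × Nat × Nat) :=
  if i < n then
    (vals.getD i 0, i, pvScanEndW vals n i i) :: pvRleW vals n (pvScanEndW vals n i i + 1)
  else []
termination_by n - i
decreasing_by have := pvScanEndW_ge vals n i i; omega


lemma pvPlat_eq (ov : List (Int × Int)) (se : List Int) (L : Int) :
    ∀ (fuel seg : Nat), (L - 1 - (seg : Int)).toNat ≤ fuel →
      pvPlat ov se L fuel seg = pvPlatW ov se L seg := by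
  intro fuel
  induction fuel with
  | zero =>
    intro seg h
    rw [pvPlatW, dif_neg (by omega), pvPlat]
  | succ fuel ih =>
    intro seg h
    rw [pvPlat, pvPlatW]
    by_cases hc : (seg : Int) + 1 < L - 1 ∧ pvOv ov se seg = pvOv ov se ((seg : Int) + 1)
    · rw [if_pos hc, dif_pos hc]
      exact ih (seg + 1) (by omega)
    · rw [if_neg hc, dif_neg hc]

lemma pvScanEnd_eq (vals : List Int) (n i : Nat) :
    ∀ (fuel j : Nat), n - 1 - j ≤ fuel →
      pvScanEnd vals n i fuel j = pvScanEndW vals n i j := by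
  intro fuel
  induction fuel with
  | zero =>
    intro j h
    rw [pvScanEndW, if_neg (by rintro ⟨h1, -⟩; omega), pvScanEnd]
  | succ fuel ih =>
    intro j h
    rw [pvScanEnd, pvScanEndW]
    by_cases hc : j + 1 < n ∧ vals.getD (j + 1) 0 = vals.getD i 0
    · rw [if_pos hc, if_pos hc]
      exact ih (j + 1) (by omega)
    · rw [if_neg hc, if_neg hc]

lemma pvRle_eq (vals : List Int) (n : Nat) :
    ∀ (fuel i : Nat), n + 1 - i ≤ fuel →
      pvRle vals n fuel i = pvRleW vals n i := by
  intro fuel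
  induction fuel with
  | zero =>
    intro i h
    rw [pvRleW, if_neg (by omega), pvRle]
  | succ fuel ih =>
    intro i h
    rw [pvRle, pvRleW]
    by_cases hc : i < n
    · have hse := pvScanEnd_eq vals n i fuel i (by omega)
      have hge := pvScanEndW_ge vals n i i
      rw [if_pos hc, if_pos hc, hse, ih (pvScanEndW vals n i i + 1) (by omega)]
    · rw [if_neg hc, if_neg hc]

lemma pvLoop_eq (ov : List (Int × Int)) (se : List Int) (L gap : Int) :
    ∀ (fuel seg : Nat) (pl pw : List Int), (L - 1).toNat + 1 - seg ≤ fuel →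
      pvLoop ov se L gap fuel seg pl pw = pvLoopW ov se L gap seg pl pw := by
  intro fuel
  induction fuel with
  | zero =>
    intro seg pl pw h
    rw [pvLoopW, dif_neg (by omega), pvLoop]
  | succ fuel ih =>
    intro seg pl pw h
    rw [pvLoop, pvLoopW]
    by_cases hg : (seg : Int) + 1 < L - 1
    · rw [if_pos hg, dif_pos hg]
      have hpe := pvPlat_eq ov se L fuel seg (by omega)
      have hge := pvPlatW_ge ov se L seg
      rw [hpe]
      by_cases hc : (seg = 0 ∨ pvOv ov se seg > pvOv ov se ((seg : Int) - 1)) ∧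
          pvOv ov se seg ≥ pvOv ov se ((seg : Int) + 1)
      · rw [if_pos hc, dif_pos hc]
        by_cases hk : (pvPlatW ov se L seg : Int) + 1 < L - 1 ∧
            pvOv ov se (pvPlatW ov se L seg) < pvOv ov se ((pvPlatW ov se L seg : Int) + 1)
        · rw [if_pos hk, dif_pos hk]
          have hne : seg < pvPlatW ov se L seg := by
            rcases Nat.lt_or_ge seg (pvPlatW ov se L seg) with h1 | h1
            · exact h1
            · have heq : pvPlatW ov se L seg = seg := Nat.le_antisymm h1 hge
              rw [heq] at hk
              exact absurd hk.2 (not_lt.mpr hc.2)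
          exact ih (pvPlatW ov se L seg) pl pw (by omega)
        · rw [if_neg hk, dif_neg hk]
          exact ih (pvPlatW ov se L seg + 1) _ _ (by omega)
      · rw [if_neg hc, dif_neg hc]
        exact ih (seg + 1) pl pw (by omega)
    · rw [if_neg hg, dif_neg hg]


lemma pvScanEndW_lt (vals : List Int) (n i : Nat) : ∀ j, j < n → pvScanEndW vals n i j < n := by
  intro j hj
  fun_induction pvScanEndW <;> omega

lemma pvScanEndW_const (vals : List Int) (n i : Nat) :
    ∀ j k, vals.getD j 0 = vals.getD i 0 → j ≤ k → k ≤ pvScanEndW vals n i j →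
      vals.getD k 0 = vals.getD i 0 := by
  intro j k hj hjk hk
  fun_induction pvScanEndW vals n i j with
  | case1 j hcond ih =>
    rcases Nat.eq_or_lt_of_le hjk with rfl | hlt
    · exact hj
    · exact ih hcond.2 hlt hk
  | case2 j hcond =>
    have : k = j := Nat.le_antisymm hk hjk
    exact this ▸ hj

lemma pvScanEndW_stop (vals : List Int) (n i j : Nat) :
    ¬(pvScanEndW vals n i j + 1 < n ∧ vals.getD (pvScanEndW vals n i j + 1) 0 = vals.getD i 0) := by
  fun_induction pvScanEndW vals n i j with
  | case1 j hcond ih => exact ih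
  | case2 j hcond => exact hcond

lemma pv_plat_scan (ov : List (Int × Int)) (se : List Int) (L : Int) (vals : List Int) (N : Nat)
    (hN : (N : Int) = L - 1)
    (hv : ∀ k : Nat, k < N → vals.getD k 0 = pvOv ov se k) (i : Nat) (hi : i < N) :
    ∀ j, i ≤ j → j < N → pvOv ov se j = pvOv ov se i →
      pvPlatW ov se L j = pvScanEndW vals N i j := by
  suffices h : ∀ (m j : Nat), N - j ≤ m → i ≤ j → j < N → pvOv ov se j = pvOv ov se i →
      pvPlatW ov se L j = pvScanEndW vals N i j by
    intro j h1 h2 h3; exact h N j (by omega) h1 h2 h3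
  intro m
  induction m with
  | zero => intro j h0 h1 h2 h3; omega
  | succ m ih =>
    intro j h0 h1 h2 h3
    have hcast : ((j + 1 : Nat) : Int) = (j : Int) + 1 := by push_cast; ring
    by_cases hg : j + 1 < N ∧ pvOv ov se ((j : Int) + 1) = pvOv ov se i
    · have hplatg : (j : Int) + 1 < L - 1 ∧ pvOv ov se j = pvOv ov se ((j : Int) + 1) := by
        refine ⟨by omega, ?_⟩
        rw [h3, hg.2]
      have hscang : j + 1 < N ∧ vals.getD (j + 1) 0 = vals.getD i 0 := by
        refine ⟨hg.1, ?_⟩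
        rw [hv (j + 1) hg.1, hv i (by omega), hcast, hg.2]
      rw [pvPlatW, pvScanEndW, dif_pos hplatg, if_pos hscang]
      exact ih (j + 1) (by omega) (by omega) hg.1 (by rw [hcast]; exact hg.2)
    · have hplatng : ¬((j : Int) + 1 < L - 1 ∧ pvOv ov se j = pvOv ov se ((j : Int) + 1)) := by
        intro hc
        exact hg ⟨by omega, by rw [← hc.2, h3]⟩
      have hscanng : ¬(j + 1 < N ∧ vals.getD (j + 1) 0 = vals.getD i 0) := by
        intro hc
        refine hg ⟨hc.1, ?_⟩
        have e1 := hv (j + 1) hc.1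
        have e2 := hv i (by omega)
        rw [← hcast, ← e1, hc.2, e2]
      rw [pvPlatW, pvScanEndW, dif_neg hplatng, if_neg hscanng]

lemma pv_walk (ov : List (Int × Int)) (se : List Int) (L gap : Int) (N : Nat)
    (hN : (N : Int) = L - 1) :
    ∀ (m k j : Nat) (pl pw : List Int), j - k ≤ m → 0 < k → k ≤ j → j < N →
      (∀ t, k ≤ t → t ≤ j → pvOv ov se t = pvOv ov se j) →
      pvOv ov se k ≤ pvOv ov se ((k : Int) - 1) →
      pvLoopW ov se L gap k pl pw
        = if j + 1 < N then pvLoopW ov se L gap (j + 1) pl pw else (j, pl, pw) := by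
  have hlast : ∀ (j : Nat) (pl pw : List Int), 0 < j → j < N →
      pvOv ov se j ≤ pvOv ov se ((j : Int) - 1) →
      pvLoopW ov se L gap j pl pw
        = if j + 1 < N then pvLoopW ov se L gap (j + 1) pl pw else (j, pl, pw) := by
    intro j pl pw hj0 hjN hdesc
    rw [pvLoopW]
    by_cases hg : (j : Int) + 1 < L - 1
    · have hcond : ¬((j = 0 ∨ pvOv ov se j > pvOv ov se ((j : Int) - 1)) ∧
          pvOv ov se j ≥ pvOv ov se ((j : Int) + 1)) := by
        rintro ⟨h1 | h2, -⟩
        · omega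
        · exact absurd h2 (not_lt.mpr hdesc)
      rw [dif_pos hg, dif_neg hcond, if_pos (by omega : j + 1 < N)]
    · rw [dif_neg hg, if_neg (by omega : ¬ j + 1 < N)]
  intro m
  induction m with
  | zero =>
    intro k j pl pw h0 hk0 hkj hjN hconst hdesc
    have hkeq : k = j := by omega
    subst hkeq
    exact hlast k pl pw hk0 hjN hdesc
  | succ m ih =>
    intro k j pl pw h0 hk0 hkj hjN hconst hdesc
    rcases Nat.eq_or_lt_of_le hkj with rfl | hlt
    · exact hlast k pl pw hk0 hjN hdesc
    · rw [pvLoopW]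
      have hg : (k : Int) + 1 < L - 1 := by omega
      have hcond : ¬((k = 0 ∨ pvOv ov se k > pvOv ov se ((k : Int) - 1)) ∧
          pvOv ov se k ≥ pvOv ov se ((k : Int) + 1)) := by
        rintro ⟨h1 | h2, -⟩
        · omega
        · exact absurd h2 (not_lt.mpr hdesc)
      rw [dif_pos hg, dif_neg hcond]
      have hcast : ((k + 1 : Nat) : Int) = (k : Int) + 1 := by push_cast; ring
      refine ih (k + 1) j pl pw (by omega) (by omega) (by omega) hjN
        (fun t h1 h2 => hconst t (by omega) h2) ?_
      have e1 : pvOv ov se ((k + 1 : Nat)) = pvOv ov se j := hconst (k + 1) (by omega) (by omega)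
      have e2 : pvOv ov se k = pvOv ov se j := hconst k le_rfl (by omega)
      have e3 : ((k + 1 : Nat) : Int) - 1 = (k : Int) := by push_cast; ring
      rw [e3, e1, e2]

lemma pv_floordiv_half (a g : Int) :
    PySem.Int.floordiv (a + a + g) 2 = a + PySem.Int.floordiv g 2 := by
  rw [PySem.Int.floordiv_eq_ediv_of_pos (by norm_num), PySem.Int.floordiv_eq_ediv_of_pos (by norm_num)]
  omega

lemma pvTail_mk (ov : List (Int × Int)) (se : List Int) (L gap : Int) (seg : Nat)
    (pl pw : List Int) :
    pvTail ov se L gap (seg, pl, pw)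
      = if (seg : Int) + 1 = L - 1 ∧ pvOv ov se seg > pvOv ov se ((seg : Int) - 1) then
          (pl ++ [pvIdx se seg + PySem.Int.floordiv gap 2], pw ++ [1])
        else (pl, pw) := rfl

lemma pvPeaks_cons (se : List Int) (gap : Int) (prev : Option Int) (v : Int) (s e : Nat)
    (gs : List (Int × Nat × Nat)) :
    pvPeaks se gap prev ((v, s, e) :: gs)
      = if pvRising prev v && pvFalling gs v then
          (PySem.Int.floordiv (pvIdx se e + pvIdx se s + gap) 2, (e : Int) - (s : Int) + 1)
            :: pvPeaks se gap (some v) gs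
        else pvPeaks se gap (some v) gs := rfl

lemma pv_main (ov : List (Int × Int)) (se : List Int) (L gap : Int) (vals : List Int) (N : Nat)
    (hN : (N : Int) = L - 1) (hN2 : 2 ≤ N)
    (hv : ∀ k : Nat, k < N → vals.getD k 0 = pvOv ov se k) :
    ∀ (m i : Nat) (prev : Option Int) (pl pw : List Int), N - i ≤ m → i ≤ N →
      (i = 0 ∧ prev = none ∨
        0 < i ∧ prev = some (pvOv ov se ((i : Int) - 1)) ∧
          (i < N → pvOv ov se ((i : Int) - 1) ≠ pvOv ov se i)) →
      pvTail ov se L gap (pvLoopW ov se L gap i pl pw)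
        = (pl ++ (pvPeaks se gap prev (pvRleW vals N i)).map Prod.fst,
           pw ++ (pvPeaks se gap prev (pvRleW vals N i)).map Prod.snd) := by
  have hexit : ∀ (prev : Option Int) (pl pw : List Int),
      pvTail ov se L gap (pvLoopW ov se L gap N pl pw)
        = (pl ++ (pvPeaks se gap prev (pvRleW vals N N)).map Prod.fst,
           pw ++ (pvPeaks se gap prev (pvRleW vals N N)).map Prod.snd) := by
    intro prev pl pw
    rw [pvLoopW, dif_neg (by omega : ¬((N : Nat) : Int) + 1 < L - 1)]
    rw [pvRleW, if_neg (by omega : ¬ N < N), pvTail_mk,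
      if_neg (by rintro ⟨h1, -⟩; omega)]
    simp [pvPeaks]
  intro m
  induction m with
  | zero =>
    intro i prev pl pw h0 hiN hstart
    have : i = N := by omega
    subst this
    exact hexit prev pl pw
  | succ m ih =>
    intro i prev pl pw h0 hiN hstart
    rcases Nat.eq_or_lt_of_le hiN with rfl | hiltN
    · exact hexit prev pl pw
    -- i < N : the group starting at i runs to j := pvScanEndW vals N i i
    have hji : i ≤ pvScanEndW vals N i i := pvScanEndW_ge vals N i i
    have hjN : pvScanEndW vals N i i < N := pvScanEndW_lt vals N i i hiltN
    set j := pvScanEndW vals N i i with hjdef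
    have hconstV : ∀ k : Nat, i ≤ k → k ≤ j → pvOv ov se k = pvOv ov se i := by
      intro k h1 h2
      have h3 := pvScanEndW_const vals N i i k rfl h1 h2
      rw [hv k (by omega), hv i (by omega)] at h3
      exact h3
    have hbnd : j + 1 < N → pvOv ov se ((j + 1 : Nat)) ≠ pvOv ov se i := by
      intro hlt heq
      exact pvScanEndW_stop vals N i i
        ⟨hlt, by rw [hv (j + 1) hlt, hv i (by omega)]; exact heq⟩
    have hvi : vals.getD i 0 = pvOv ov se i := hv i (by omega)
    have hrle : pvRleW vals N i = (pvOv ov se i, i, j) :: pvRleW vals N (j + 1) := by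
      rw [pvRleW, if_pos hiltN, hvi]
    have hc1 : ((i + 1 : Nat) : Int) = (i : Int) + 1 := by push_cast; ring
    have hc2 : ((j + 1 : Nat) : Int) = (j : Int) + 1 := by push_cast; ring
    have hc3 : ((j + 1 : Nat) : Int) - 1 = (j : Int) := by push_cast; ring
    have hStartNext : j + 1 = 0 ∧ (some (pvOv ov se i) : Option Int) = none ∨
        0 < j + 1 ∧ (some (pvOv ov se i) : Option Int)
            = some (pvOv ov se (((j + 1 : Nat) : Int) - 1)) ∧
          (j + 1 < N → pvOv ov se (((j + 1 : Nat) : Int) - 1) ≠ pvOv ov se ((j + 1 : Nat))) := by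
      right
      refine ⟨by omega, by rw [hc3, hconstV j hji le_rfl], ?_⟩
      intro hlt
      rw [hc3, hconstV j hji le_rfl]
      exact fun he => hbnd hlt he.symm
    have hrb : pvRising prev (pvOv ov se i)
        = decide (i = 0 ∨ pvOv ov se i > pvOv ov se ((i : Int) - 1)) := by
      rcases hstart with ⟨rfl, rfl⟩ | ⟨hi0, rfl, -⟩
      · simp [pvRising]
      · simp only [pvRising, decide_eq_decide]
        constructor
        · exact Or.inr
        · rintro (h | h)
          · omega
          · exact h
    by_cases hrise : i = 0 ∨ pvOv ov se i > pvOv ov se ((i : Int) - 1)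
    · -- the group is rising (or first)
      by_cases hg : (i : Int) + 1 < L - 1
      · -- the main loop examines this group start
        have hplat : pvPlatW ov se L i = j :=
          pv_plat_scan ov se L vals N hN hv i hiltN i le_rfl hiltN rfl
        rcases Nat.eq_or_lt_of_le hji with hij | hij
        · -- singleton group, j = i
          rw [← hij] at hbnd hrle hStartNext
          have hne : pvOv ov se ((i : Int) + 1) ≠ pvOv ov se i := by
            rw [← hc1]; exact hbnd (by omega)
          have hfallc : pvFalling (pvRleW vals N (i + 1)) (pvOv ov se i)
              = decide (pvOv ov se i > pvOv ov se ((i : Int) + 1)) := by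
            rw [pvRleW, if_pos (by omega : i + 1 < N)]
            simp only [pvFalling]
            rw [hv (i + 1) (by omega), hc1]
          rcases lt_trichotomy (pvOv ov se ((i : Int) + 1)) (pvOv ov se i) with hlt2 | heq2 | hgt2
          · -- falls to the next value: accepted peak of width 1
            rw [pvLoopW, dif_pos hg, dif_pos ⟨hrise, le_of_lt hlt2⟩, hplat, ← hij,
              dif_neg (by rintro ⟨-, h2⟩; exact absurd h2 (not_lt.mpr (le_of_lt hlt2)))]
            rw [ih (i + 1) (some (pvOv ov se i)) _ _ (by omega) (by omega) hStartNext]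
            rw [hrle, pvPeaks_cons, hrb, hfallc,
              if_pos (by rw [Bool.and_eq_true, decide_eq_true_eq, decide_eq_true_eq]; exact ⟨hrise, hlt2⟩)]
            simp [List.append_assoc]
          · exact absurd heq2 hne
          · -- rises to the next value: not a peak
            rw [pvLoopW, dif_pos hg,
              dif_neg (by rintro ⟨-, h2⟩; exact absurd h2 (not_le.mpr hgt2))]
            rw [ih (i + 1) (some (pvOv ov se i)) _ _ (by omega) (by omega) hStartNext]
            rw [hrle, pvPeaks_cons, hrb, hfallc,
              if_neg (by rw [Bool.and_eq_true, decide_eq_true_eq, decide_eq_true_eq]; rintro ⟨-, h2⟩; exact absurd h2 (not_lt.mpr (le_of_lt hgt2)))]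
        · -- plateau group, i < j
          have heq1 : pvOv ov se ((i : Int) + 1) = pvOv ov se i := by
            rw [← hc1]; exact hconstV (i + 1) (by omega) hij
          rw [pvLoopW, dif_pos hg, dif_pos ⟨hrise, heq1.le⟩, hplat]
          by_cases hcont : j + 1 < N ∧ pvOv ov se ((j : Int)) < pvOv ov se ((j : Int) + 1)
          · -- plateau then rise: 'continue', then the loop skips past the group; no peak
            have hfallc : pvFalling (pvRleW vals N (j + 1)) (pvOv ov se i)
                = decide (pvOv ov se i > pvOv ov se ((j : Int) + 1)) := by
              rw [pvRleW, if_pos hcont.1]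
              simp only [pvFalling]
              rw [hv (j + 1) hcont.1, hc2]
            rw [dif_pos ⟨by omega, hcont.2⟩]
            rw [pvLoopW, dif_pos (by omega : (j : Int) + 1 < L - 1),
              dif_neg (by rintro ⟨-, h2⟩; exact absurd hcont.2 (not_lt.mpr h2))]
            rw [ih (j + 1) (some (pvOv ov se i)) _ _ (by omega) (by omega) hStartNext]
            rw [hrle, pvPeaks_cons, hrb, hfallc, if_neg]
            rw [Bool.and_eq_true, decide_eq_true_eq, decide_eq_true_eq]
            rintro ⟨-, h4⟩
            have h2 := hconstV j hji le_rfl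
            have h3 := hcont.2
            omega
          · -- plateau ends the window or falls below: accepted peak
            have hfall : pvFalling (pvRleW vals N (j + 1)) (pvOv ov se i) = true := by
              by_cases hjn : j + 1 < N
              · rw [pvRleW, if_pos hjn]
                simp only [pvFalling]
                rw [hv (j + 1) hjn, hc2, decide_eq_true_eq]
                have h1 := hbnd hjn
                have h2 := hconstV j hji le_rfl
                have h3 : ¬ pvOv ov se ((j : Int)) < pvOv ov se ((j : Int) + 1) :=
                  fun hh => hcont ⟨hjn, hh⟩
                rw [hc2] at h1
                omega
              · rw [pvRleW, if_neg hjn]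
                rfl
            rw [dif_neg (by rintro ⟨h1, h2⟩; exact hcont ⟨by omega, h2⟩)]
            rw [ih (j + 1) (some (pvOv ov se i)) _ _ (by omega) (by omega) hStartNext]
            rw [hrle, pvPeaks_cons, hrb, hfall,
              if_pos (by rw [Bool.and_eq_true, decide_eq_true_eq]; exact ⟨hrise, rfl⟩)]
            simp [List.append_assoc]
      · -- i + 1 = N : the loop exits at once; A's tail clause decides this last group
        have hjeq : j = i := by
          rcases Nat.eq_or_lt_of_le hji with h | h
          · omega
          · exact absurd hjN (by omega)
        rw [pvLoopW, dif_neg hg, pvTail_mk, if_pos]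
        · rw [hrle, hjeq, pvRleW, if_neg (by omega : ¬ i + 1 < N), pvPeaks_cons, hrb]
          rw [if_pos (by rw [Bool.and_eq_true, decide_eq_true_eq]; exact ⟨hrise, rfl⟩)]
          simp [pvPeaks]
          omega
        · refine ⟨by omega, ?_⟩
          rcases hrise with h | h
          · omega
          · exact h
    · -- not rising: the whole group is walked over with no peak
      have hi0 : 0 < i := by
        rcases hstart with ⟨rfl, -⟩ | ⟨h, -, -⟩
        · exact absurd (Or.inl rfl) hrise
        · exact h
      have hdesc : pvOv ov se i ≤ pvOv ov se ((i : Int) - 1) := by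
        rcases lt_or_ge (pvOv ov se ((i : Int) - 1)) (pvOv ov se i) with h | h
        · exact absurd (Or.inr h) hrise
        · exact h
      have hnopeak : ∀ gs, pvPeaks se gap prev ((pvOv ov se i, i, j) :: gs)
          = pvPeaks se gap (some (pvOv ov se i)) gs := by
        intro gs
        rw [pvPeaks_cons, hrb,
          if_neg (by rw [Bool.and_eq_true, decide_eq_true_eq]; rintro ⟨h1, -⟩; exact hrise h1)]
      have hwalk := pv_walk ov se L gap N hN (j - i) i j pl pw le_rfl hi0 hji hjN
        (fun t h1 h2 => by rw [hconstV t h1 h2, hconstV j hji le_rfl]) hdesc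
      rw [hwalk]
      by_cases hjn : j + 1 < N
      · rw [if_pos hjn]
        rw [ih (j + 1) (some (pvOv ov se i)) _ _ (by omega) (by omega) hStartNext]
        rw [hrle, hnopeak]
      · rw [if_neg hjn, pvTail_mk, if_neg]
        · rw [hrle, hnopeak, pvRleW, if_neg hjn]
          simp [pvPeaks]
        · rintro ⟨h1, h2⟩
          rcases Nat.eq_or_lt_of_le hji with hij | hij
          · rw [← hij] at h2
            exact absurd h2 (not_lt.mpr hdesc)
          · have e1 : ((j : Int) - 1) = ((j - 1 : Nat) : Int) := by omega
            have e2 := hconstV (j - 1) (by omega) (by omega)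
            have e3 := hconstV j hji le_rfl
            rw [e1, e2, e3] at h2
            exact lt_irrefl _ h2

lemma pv_mul_maps (l : List (Int × Int)) :
    pvMul (l.map Prod.fst) (l.map Prod.snd) = l.map (fun p => p.1 * p.2) := by
  induction l with
  | nil => rfl
  | cons x xs ih => simp [pvMul] at ih ⊢; exact ih

lemma pv_A_two (ov : List (Int × Int)) (a b x y : Int) :
    getPeak ov [a, b] x y
      = if (ov.lookup b).getD 0 < (ov.lookup a).getD 0 then
          a + PySem.Int.floordiv (b - a) 2
        else -1 := by
  simp only [getPeak]
  rw [pvLoop_eq ov [a, b] (([a, b].length : Int)) (pvIdx [a, b] 1 - pvIdx [a, b] 0)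
    ([a, b].length + 1) 0 [] [] (by norm_num)]
  rw [pvLoopW, dif_neg (by norm_num)]
  rw [pvTail_mk]
  have e0 : pvOv ov [a, b] ((0 : Nat) : Int) = (ov.lookup a).getD 0 := by
    simp [pvOv, pvIdx]
  have em1 : pvOv ov [a, b] (((0 : Nat) : Int) - 1) = (ov.lookup b).getD 0 := by
    norm_num [pvOv, pvIdx, PySem.List.pyGet?, PySem.List.pyIdx?]
  rw [em1, e0]
  by_cases hgt : (ov.lookup b).getD 0 < (ov.lookup a).getD 0
  · rw [if_pos (show ((0:Nat) : Int) + 1 = (([a, b].length : Nat) : Int) - 1 ∧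
        (List.lookup a ov).getD 0 > (List.lookup b ov).getD 0 from ⟨by norm_num, hgt⟩)]
    rw [if_pos hgt]
    simp [pvMul, pvIdx, PySem.List.pyGet?, PySem.List.pyIdx?]
  · rw [if_neg (show ¬(((0:Nat) : Int) + 1 = (([a, b].length : Nat) : Int) - 1 ∧
        (List.lookup a ov).getD 0 > (List.lookup b ov).getD 0) from fun hc => hgt hc.2)]
    rw [if_neg hgt]
    simp

lemma pv_B_two (ov : List (Int × Int)) (a b x y : Int) :
    getPeak_alt ov [a, b] x y
      = PySem.Int.floordiv (a + a + (b - a)) 2 := by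
  simp only [getPeak_alt]
  have hr : PySem.List.pyRange 0 ((([a, b].length : Nat) : Int) - 1) 1 = [0] := by
    norm_num [PySem.List.pyRange_one]
  rw [hr]
  simp only [List.map_cons, List.map_nil, List.length_cons, List.length_nil, Nat.zero_add]
  rw [pvRle_eq [pvOv ov [a, b] 0] 1 (1 + 1) 0 (by norm_num)]
  have hscan : pvScanEndW [pvOv ov [a, b] 0] 1 0 0 = 0 := by
    rw [pvScanEndW, if_neg]
    rintro ⟨h, -⟩
    omega
  have hrle1 : pvRleW [pvOv ov [a, b] 0] 1 0 = [(pvOv ov [a, b] 0, 0, 0)] := by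
    rw [pvRleW, if_pos (by omega : (0:Nat) < 1), hscan, pvRleW, if_neg (by omega : ¬ (1:Nat) < 1)]
    simp
  rw [hrle1, pvPeaks_cons]
  simp [pvRising, pvFalling, pvPeaks, pvIdx, PySem.List.pyGet?, PySem.List.pyIdx?]

-- ===== VERDICT (by name: the statement is the Claim_ definition above) =====
theorem getPeak_spec : Claim_unchanged_getPeak := by
  intro ov se x y hdom hpre hnd
  obtain ⟨hlen2, -, -⟩ := hpre
  rcases eq_or_lt_of_le hlen2 with hl2 | hl3
  · -- length = 2
    obtain ⟨a, b, rfl⟩ : ∃ a b, se = [a, b] := by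
      rcases se with _ | ⟨a, t⟩
      · simp at hl2
      rcases t with _ | ⟨b, t⟩
      · simp at hl2
      rcases t with _ | ⟨c, t⟩
      · exact ⟨a, b, rfl⟩
      · simp at hl2
    have hgt : (ov.lookup b).getD 0 < (ov.lookup a).getD 0 := by
      by_contra hle
      exact hnd ⟨rfl, by simpa using not_lt.mp hle⟩
    rw [pv_A_two, pv_B_two, if_pos hgt]
    exact (pv_floordiv_half a (b - a)).symm
  · -- length ≥ 3
    have hNn1 : ((se.length : Int)) - 1 = (((se.length - 1 : Nat)) : Int) := by omega
    simp only [getPeak, getPeak_alt, hNn1]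
    set Nn : Nat := se.length - 1 with hNn
    set gap : Int := pvIdx se 1 - pvIdx se 0 with hgap
    set vals : List Int := (PySem.List.pyRange 0 ((Nn : Nat) : Int) 1).map
      (fun i => pvOv ov se i) with hvals
    have hlenv : vals.length = Nn := by
      rw [hvals, List.length_map, PySem.List.length_pyRange_one]
      omega
    have hv : ∀ k : Nat, k < Nn → vals.getD k 0 = pvOv ov se k := by
      intro k hk
      rw [List.getD_eq_getElem?_getD, hvals,
        PySem.List.getElem?_map_pyRange_zero _ Nn k hk]
      rfl
    have hmain := pv_main ov se (se.length : Int) gap vals Nn (by omega) (by omega) hv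
      Nn 0 none [] [] (by omega) (by omega) (Or.inl ⟨rfl, rfl⟩)
    rw [pvLoop_eq ov se (se.length : Int) gap (se.length + 1) 0 [] [] (by omega),
      pvRle_eq vals vals.length (vals.length + 1) 0 (by omega), hlenv, hmain]
    simp only [List.nil_append]
    cases hP : pvPeaks se gap none (pvRleW vals Nn 0) with
    | nil => simp
    | cons p0 Ps =>
      simp only [List.isEmpty_cons, List.length_map, List.length_cons,
        Nat.zero_lt_succ, if_true, Bool.false_eq_true, if_false]
      rw [pv_mul_maps]

theorem getPeak_changed : Claim_changed_getPeak := by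
  unfold Claim_changed_getPeak
  refine ⟨by decide, by decide, by decide, ?_, ?_, by decide⟩
  · rw [show pvDiffWitness_getPeak.2.1 = [(0 : Int), 1] from rfl, pv_A_two]
    decide
  · rw [show pvDiffWitness_getPeak.2.1 = [(0 : Int), 1] from rfl, pv_B_two]
    decide
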